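-- pv_equiv track=rewrite | github.com/DaeYejun2/YejunBaekjoon | 프로그래머스/1/42840. 모의고사/모의고사.py | solution
-- ===== SOURCE A (Python) =====
-- def solution(answers):
--     a1 = [1,2,3,4,5] ;i1 = 0
--     b1 = [2,1,2,3,2,4,2,5]; i2 = 0
--     c1 = [3,3,1,1,2,2,4,4,5,5]; i3 = 0
--
--     tmp = [0, 0, 0]
--
--     for ans in answers:
--         if ans == a1[i1]: tmp[0] += 1
--         if ans == b1[i2]: tmp[1] += 1
--         if ans == c1[i3]: tmp[2] += 1
--         i1 = (i1+1) % 5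
--         i2 = (i2+1) % 8
--         i3 = (i3+1) % 10
--
--     max_t = max(tmp); res = []
--     for i in range(3):
--         if tmp[i] == max_t:
--             res.append(i+1)
--     res.sort()
--     return res
-- ===== SOURCE B (Python) =====
-- def solution(answers):
--     def score(pat):
--         n = len(pat)
--         return sum(answers[r::n].count(v) for r, v in enumerate(pat))
--
--     counts = [score([1, 2, 3, 4, 5]),
--               score([2, 1, 2, 3, 2, 4, 2, 5]),
--               score([3, 3, 1, 1, 2, 2, 4, 4, 5, 5])]
--     m = max(counts)
--     return [i + 1 for i, c in enumerate(counts) if c == m]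
-- ===== Notes on version B (the rewrite author's own statement) =====
-- stated objective: alternative
-- what changed: Replaces A's element-by-element scan with cycling modular indices by residue-class counting: for each pattern slot r the score is answers[r::n].count(pat[r]) over the strided slice, so no position of answers is ever compared against a cycling pattern; the range(3) loop + sort result assembly becomes one enumerate comprehension.
import Mathlib
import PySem

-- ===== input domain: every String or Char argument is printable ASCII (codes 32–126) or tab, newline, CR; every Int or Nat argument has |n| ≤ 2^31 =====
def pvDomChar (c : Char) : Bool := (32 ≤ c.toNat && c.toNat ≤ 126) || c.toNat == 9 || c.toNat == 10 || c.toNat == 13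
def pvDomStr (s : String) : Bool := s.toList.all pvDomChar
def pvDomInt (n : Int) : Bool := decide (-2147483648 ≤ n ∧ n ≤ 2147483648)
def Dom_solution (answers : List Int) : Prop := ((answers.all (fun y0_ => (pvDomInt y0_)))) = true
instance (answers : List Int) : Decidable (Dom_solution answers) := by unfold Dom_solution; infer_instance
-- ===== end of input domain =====

-- B scores each pattern by residue classes — answers[r::n].count(pat[r]) over strided
-- slices, never comparing elements against a cycling pattern — instead of A's fused
-- scan with modular indices, mutable tmp, range(3) loop and sort (objective: alternative).

-- ===== PORT A =====
-- A's loop: tmp = [t1,t2,t3] ported as a triple (indices into tmp are the constants 0,1,2);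
-- i1,i2,i3 are kept as Nat (they are always ≥ 0 and reduced mod 5/8/10, so list indexing is in range
-- and getD never takes its default).
def solLoopA (answers : List Int) (i1 i2 i3 : Nat) (t1 t2 t3 : Int) : Int × Int × Int :=
  match answers with
  | [] => (t1, t2, t3)
  | ans :: rest =>
    solLoopA rest ((i1 + 1) % 5) ((i2 + 1) % 8) ((i3 + 1) % 10)
      (if ans = ([1, 2, 3, 4, 5] : List Int).getD i1 0 then t1 + 1 else t1)
      (if ans = ([2, 1, 2, 3, 2, 4, 2, 5] : List Int).getD i2 0 then t2 + 1 else t2)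
      (if ans = ([3, 3, 1, 1, 2, 2, 4, 4, 5, 5] : List Int).getD i3 0 then t3 + 1 else t3)

def solution (answers : List Int) : List Int :=
  let t := solLoopA answers 0 0 0 0 0 0
  -- max(tmp): tmp has three elements, so max? is some; getD's default is never used
  let max_t := (PySem.List.max? [t.1, t.2.1, t.2.2] (fun x => x)).getD 0
  -- for i in range(3): if tmp[i] == max_t: res.append(i+1)  — unrolled over the constant range(3)
  let res := (if t.1 = max_t then [(1 : Int)] else []) ++
             (if t.2.1 = max_t then [(2 : Int)] else []) ++
             (if t.2.2 = max_t then [(3 : Int)] else [])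
  PySem.List.sorted res (fun x => x) false

-- ===== PORT B =====
-- Source B's score(pat): answers[r::n] is PySem.List.slice? with step n (some, since n > 0, so
-- getD never takes its default); .count is PySem.List.count = List.count; sum over
-- enumerate(pat) is the sum of the mapped zipIdx list.
def scoreB (answers pat : List Int) : Int :=
  (pat.zipIdx.map (fun p =>
      (((PySem.List.slice? answers (some (p.2 : Int)) none (pat.length : Int)).getD []).count p.1 : Int))).sum

def solution_alt (answers : List Int) : List Int :=
  let counts : List Int := [scoreB answers [1, 2, 3, 4, 5],
                            scoreB answers [2, 1, 2, 3, 2, 4, 2, 5],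
                            scoreB answers [3, 3, 1, 1, 2, 2, 4, 4, 5, 5]]
  let m := (PySem.List.max? counts (fun x => x)).getD 0
  (counts.zipIdx.filter (fun p => p.1 = m)).map (fun p => (p.2 : Int) + 1)

-- ===== PRECONDITION & SPEC =====
def Spec_solution (answers : List Int) (out : List Int) : Prop := out = solution_alt answers
instance (answers : List Int) (out : List Int) : Decidable (Spec_solution answers out) := by unfold Spec_solution; infer_instance

-- ===== CLAIM (what is proved, stated in full; the proofs are below) =====
def Claim_equal_solution : Prop := ∀ (answers : List Int), Dom_solution answers → Spec_solution answers (solution answers)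

-- ===== LEMMAS AND PROOFS =====

/-- Offset-indexed match count: common characterisation of both programs. -/
def cnt (pat : List Int) : List Int → Nat → Int
  | [], _ => 0
  | a :: rest, i => (if a = pat.getD i 0 then 1 else 0) + cnt pat rest ((i + 1) % pat.length)

lemma solLoopA_eq (answers : List Int) :
    ∀ (i1 i2 i3 : Nat) (t1 t2 t3 : Int),
      solLoopA answers i1 i2 i3 t1 t2 t3 =
        (t1 + cnt [1, 2, 3, 4, 5] answers i1,
         t2 + cnt [2, 1, 2, 3, 2, 4, 2, 5] answers i2,
         t3 + cnt [3, 3, 1, 1, 2, 2, 4, 4, 5, 5] answers i3) := by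
  induction answers with
  | nil => intro i1 i2 i3 t1 t2 t3; simp [solLoopA, cnt]
  | cons a rest ih =>
    intro i1 i2 i3 t1 t2 t3
    simp only [solLoopA, cnt, ih, List.length_cons, List.length_nil]
    refine Prod.ext ?_ (Prod.ext ?_ ?_) <;> simp <;> split_ifs <;> ring

/-- The elements of xs at positions r, r+n, r+2n, … (recursive form of answers[r::n]). -/
def strideL : List Int → Nat → Nat → List Int
  | [], _, _ => []
  | a :: rest, 0, n => a :: strideL rest (n - 1) n
  | _ :: rest, r + 1, n => strideL rest r n

/-- strideL as a filterMap over all indices (out-of-range lookups vanish). -/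
lemma strideL_eq_filterMap (xs : List Int) :
    ∀ (r n : Nat), 0 < n →
      strideL xs r n = (List.range xs.length).filterMap (fun k => xs[r + n * k]?) := by
  induction xs with
  | nil => intro r n hn; simp [strideL]
  | cons a rest ih =>
    intro r n hn
    match r with
    | 0 =>
      rw [strideL, List.length_cons, List.range_succ_eq_map, List.filterMap_cons,
        List.filterMap_map]
      simp only [Nat.zero_add, Nat.mul_zero, List.getElem?_cons_zero, Function.comp_def]
      have hidx : ∀ k : Nat, (a :: rest)[n * (k + 1)]? = rest[(n - 1) + n * k]? := by
        intro k
        have h1 : n * (k + 1) = ((n - 1) + n * k) + 1 := by cases n with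
          | zero => omega
          | succ m => ring_nf; omega
        rw [h1, List.getElem?_cons_succ]
      simp only [Nat.succ_eq_add_one, hidx]
      rw [← ih (n - 1) n hn]
    | r' + 1 =>
      rw [strideL, List.length_cons, List.range_succ, List.filterMap_append]
      have hidx : ∀ k : Nat, (a :: rest)[(r' + 1) + n * k]? = rest[r' + n * k]? := by
        intro k
        have h1 : (r' + 1) + n * k = (r' + n * k) + 1 := by omega
        rw [h1, List.getElem?_cons_succ]
      simp only [hidx, List.filterMap_cons, List.filterMap_nil]
      have hnone : rest[r' + n * rest.length]? = none := by
        apply List.getElem?_eq_none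
        nlinarith
      rw [hnone]
      simp [← ih r' n hn]

/-- The Python slice answers[r::n] (n > 0) is strideL. -/
lemma slice?_pos_stride (xs : List Int) (r n : Nat) (hn : 0 < n) :
    PySem.List.slice? xs (some (r : Int)) none (n : Int) = some (strideL xs r n) := by
  have hne : (n : Int) ≠ 0 := by exact_mod_cast hn.ne'
  have hnotneg : ¬ ((n : Int) < 0) := by omega
  have hrnn : ¬ ((r : Int) < 0) := by omega
  simp only [PySem.List.slice?, PySem.List.sliceIndices, hne, hnotneg, hrnn, if_false]
  rw [strideL_eq_filterMap xs r n hn]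
  by_cases hr : r < xs.length
  · have hmin : min (r : Int) (xs.length : Int) = (r : Int) := by omega
    have hlt : (0 : Int) < (n : Int) := by exact_mod_cast hn
    have hlt2 : (r : Int) < (xs.length : Int) := by exact_mod_cast hr
    set L := xs.length with hL
    set c : Nat := (L - r + n - 1) / n with hc
    have hcast : (((L : Int) - r + n - 1) / n).toNat = c := by
      have h1 : ((L : Int) - r + n - 1) = ((L - r + n - 1 : Nat) : Int) := by omega
      rw [h1, ← Int.natCast_div, Int.toNat_natCast, hc]
    simp only [hmin, hlt, hlt2, if_pos]
    rw [hcast]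
    -- n * c ≥ L - r
    have hdm : n * c + (L - r + n - 1) % n = L - r + n - 1 := by
      rw [hc]; exact Nat.div_add_mod _ _
    have hmlt := Nat.mod_lt (L - r + n - 1) hn
    have hbound : L - r ≤ n * c := by omega
    have hcL : c ≤ L := by
      have hLn : L ≤ n * L := Nat.le_mul_of_pos_left L hn
      have h2 : L - r + n - 1 ≤ n * L + (n - 1) := by omega
      have h3 := Nat.div_le_div_right (c := n) h2
      have h4 : (n * L + (n - 1)) / n = L := by
        rw [Nat.mul_add_div hn, Nat.div_eq_of_lt (by omega)]
        omega
      omega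
    have hsplit : List.range L = List.range c ++ (List.range (L - c)).map (c + ·) := by
      rw [← List.range_add]
      congr 1
      omega
    rw [hsplit, List.filterMap_append, List.filterMap_map]
    have hnil : (List.range (L - c)).filterMap ((fun k => xs[r + n * k]?) ∘ (c + ·)) = [] := by
      rw [List.filterMap_eq_nil_iff]
      intro k hk
      simp only [Function.comp_apply]
      apply List.getElem?_eq_none
      have : n * c ≤ n * (c + k) := Nat.mul_le_mul_left n (by omega)
      omega
    rw [hnil, List.append_nil]
    congr 1
  · have hmin : min (r : Int) (xs.length : Int) = (xs.length : Int) := by omega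
    simp only [hmin, lt_irrefl, ite_self, if_false, List.range_zero, List.filterMap_nil]
    congr 1
    rw [eq_comm, List.filterMap_eq_nil_iff]
    intro k hk
    apply List.getElem?_eq_none
    omega

/-- Rotation invariant: summing per-residue counts of a rotated pattern is the fused count. -/
lemma stride_sum_eq (pat : List Int) (m : Nat) (hm : pat.length = m + 1) (xs : List Int) :
    ∀ j : Nat,
      ((List.range (m + 1)).map (fun r =>
          ((strideL xs r (m + 1)).count (pat.getD ((r + j) % (m + 1)) 0) : Int))).sum
        = cnt pat xs (j % (m + 1)) := by
  induction xs with
  | nil =>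
    intro j
    have hz : ∀ r, strideL [] r (m + 1) = [] := fun r => by cases r <;> rfl
    simp [cnt, hz]
  | cons a rest ih =>
    intro j
    rw [List.range_succ_eq_map, List.map_cons, List.sum_cons, List.map_map]
    have h0 : strideL (a :: rest) 0 (m + 1) = a :: strideL rest m (m + 1) := rfl
    have hsucc : ∀ r : Nat, strideL (a :: rest) (r + 1) (m + 1) = strideL rest r (m + 1) :=
      fun r => rfl
    have hcount : ((a :: strideL rest m (m + 1)).count (pat.getD ((0 + j) % (m + 1)) 0) : Int)
        = (if a = pat.getD (j % (m + 1)) 0 then 1 else 0)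
          + ((strideL rest m (m + 1)).count (pat.getD (j % (m + 1)) 0) : Int) := by
      rw [List.count_cons, Nat.zero_add]
      by_cases h : a = pat.getD (j % (m + 1)) 0 <;> simp [h] <;> ring
    rw [h0, hcount]
    have hlast : ((m + (j + 1)) % (m + 1)) = j % (m + 1) := by
      conv_rhs => rw [← Nat.add_mod_left (m + 1) j]
      congr 1; omega
    have hregroup :
        ((strideL rest m (m + 1)).count (pat.getD (j % (m + 1)) 0) : Int)
          + ((List.range m).map ((fun r =>
            ((strideL (a :: rest) r (m + 1)).count (pat.getD ((r + j) % (m + 1)) 0) : Int)) ∘ Nat.succ)).sum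
        = ((List.range (m + 1)).map (fun r =>
            ((strideL rest r (m + 1)).count (pat.getD ((r + (j + 1)) % (m + 1)) 0) : Int))).sum := by
      rw [List.range_succ, List.map_append, List.sum_append]
      simp only [Function.comp_def, Nat.succ_eq_add_one, List.map_cons, List.map_nil,
        List.sum_cons, List.sum_nil]
      have e1 : ∀ r ∈ List.range m,
          ((strideL (a :: rest) (r + 1) (m + 1)).count (pat.getD ((r + 1 + j) % (m + 1)) 0) : Int)
            = ((strideL rest r (m + 1)).count (pat.getD ((r + (j + 1)) % (m + 1)) 0) : Int) := by
        intro r hr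
        rw [hsucc r]
        have hidx : r + 1 + j = r + (j + 1) := by omega
        rw [hidx]
      rw [List.map_congr_left e1, hlast]
      ring
    have hmod2 : (j % (m + 1) + 1) % (m + 1) = (j + 1) % (m + 1) := by
      conv_rhs => rw [← Nat.mod_add_mod]
    rw [add_assoc, hregroup, ih (j + 1)]
    conv_rhs => simp only [cnt]
    rw [hm, hmod2]

lemma zipIdx_sum (g : Nat → Int → Int) :
    ∀ (pat : List Int) (k : Nat),
      ((pat.zipIdx k).map (fun p => g p.2 p.1)).sum
        = ((List.range pat.length).map (fun r => g (r + k) (pat.getD r 0))).sum := by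
  intro pat
  induction pat with
  | nil => intro k; simp
  | cons v rest ih =>
    intro k
    rw [List.zipIdx_cons, List.map_cons, List.sum_cons, ih (k + 1),
      List.length_cons, List.range_succ_eq_map, List.map_cons, List.sum_cons, List.map_map]
    simp only [Nat.zero_add, List.getD_cons_zero, Function.comp_def, Nat.succ_eq_add_one,
      List.getD_cons_succ]
    congr 1
    congr 1
    apply List.map_congr_left
    intro r _
    congr 1
    omega

lemma scoreB_eq (answers pat : List Int) (m : Nat) (hm : pat.length = m + 1) :
    scoreB answers pat = cnt pat answers 0 := by
  unfold scoreB
  have h1 : ∀ p ∈ pat.zipIdx,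
      ((((PySem.List.slice? answers (some (p.2 : Int)) none (pat.length : Int)).getD []).count p.1 : Nat) : Int)
        = ((strideL answers p.2 (m + 1)).count p.1 : Int) := by
    intro p _
    rw [hm]
    rw [slice?_pos_stride answers p.2 (m + 1) (by omega), Option.getD_some]
  rw [List.map_congr_left h1, zipIdx_sum (fun r v => ((strideL answers r (m + 1)).count v : Int)) pat 0]
  have h2 : ∀ r ∈ List.range pat.length,
      ((strideL answers (r + 0) (m + 1)).count (pat.getD r 0) : Int)
        = ((strideL answers r (m + 1)).count (pat.getD ((r + 0) % (m + 1)) 0) : Int) := by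
    intro r hr
    rw [List.mem_range, hm] at hr
    rw [Nat.add_zero, Nat.mod_eq_of_lt (by omega)]
  rw [hm] at h2 ⊢
  rw [List.map_congr_left h2]
  have := stride_sum_eq pat m hm answers 0
  rw [Nat.zero_mod] at this
  exact this

/-- The two result-assembly phases agree on any triple of counts. -/
lemma tail_eq (c1 c2 c3 : Int) :
    PySem.List.sorted
      ((if c1 = (PySem.List.max? [c1, c2, c3] (fun x => x)).getD 0 then [(1 : Int)] else []) ++
       (if c2 = (PySem.List.max? [c1, c2, c3] (fun x => x)).getD 0 then [(2 : Int)] else []) ++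
       (if c3 = (PySem.List.max? [c1, c2, c3] (fun x => x)).getD 0 then [(3 : Int)] else []))
      (fun x => x) false =
    ((([c1, c2, c3] : List Int).zipIdx.filter
        (fun p => p.1 = (PySem.List.max? [c1, c2, c3] (fun x => x)).getD 0)).map
      (fun p => (p.2 : Int) + 1)) := by
  set m := (PySem.List.max? [c1, c2, c3] (fun x => x)).getD 0 with hm
  by_cases h1 : c1 = m <;> by_cases h2 : c2 = m <;> by_cases h3 : c3 = m <;>
    simp [List.zipIdx, List.filter, h1, h2, h3, PySem.List.sorted, PySem.List.insertBy]

-- ===== VERDICT (by name: the statement is the Claim_ definition above) =====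
theorem solution_spec : Claim_equal_solution := by
  intro answers _
  show solution answers = solution_alt answers
  simp only [solution, solution_alt, solLoopA_eq, zero_add,
    scoreB_eq answers [1, 2, 3, 4, 5] 4 rfl,
    scoreB_eq answers [2, 1, 2, 3, 2, 4, 2, 5] 7 rfl,
    scoreB_eq answers [3, 3, 1, 1, 2, 2, 4, 4, 5, 5] 9 rfl]
  exact tail_eq _ _ _
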